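-- pv_equiv track=rewrite | github.com/abcamiletto/body-models | src/body_models/anny/io.py | build_kinematic_fronts
-- ===== SOURCE A (Python) =====
-- def build_kinematic_fronts(parents: list[int]) -> tuple[list[list[int]], list[list[int]]]:
--     """Group joints by depth for parallel forward kinematics."""
--     n = len(parents)
--     assigned = [False] * n
--     level = [i for i in range(n) if parents[i] < 0]
--     indices, parent_ids = [], []
--
--     while level:
--         indices.append(level)
--         parent_ids.append([parents[i] for i in level])
--         for j in level:
--             assigned[j] = True
--         level = [i for i in range(n) if not assigned[i] and parents[i] in level]
--
--     return indices, parent_ids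
-- ===== SOURCE B (Python) =====
-- def build_kinematic_fronts(parents: list[int]) -> tuple[list[list[int]], list[list[int]]]:
--     """Group joints by depth for parallel forward kinematics."""
--     n = len(parents)
--     children = [[] for _ in range(n)]
--     roots = []
--     for i, p in enumerate(parents):
--         if p < 0:
--             roots.append(i)
--         elif p < n:
--             children[p].append(i)
--     indices, parent_ids = [], []
--     cur = roots
--     while cur:
--         indices.append(cur)
--         parent_ids.append([parents[i] for i in cur])
--         cur = sorted(i for j in cur for i in children[j])
--     return indices, parent_ids
-- ===== Notes on version B (the rewrite author's own statement) =====
-- stated objective: alternative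
-- what changed: A rescans the whole joint range for every level and tests 'parents[i] in level' with a linear list search; B instead builds a children index and the root list in one pass over parents and expands each front directly from its joints' children buckets, sorting each front by index.
import Mathlib
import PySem

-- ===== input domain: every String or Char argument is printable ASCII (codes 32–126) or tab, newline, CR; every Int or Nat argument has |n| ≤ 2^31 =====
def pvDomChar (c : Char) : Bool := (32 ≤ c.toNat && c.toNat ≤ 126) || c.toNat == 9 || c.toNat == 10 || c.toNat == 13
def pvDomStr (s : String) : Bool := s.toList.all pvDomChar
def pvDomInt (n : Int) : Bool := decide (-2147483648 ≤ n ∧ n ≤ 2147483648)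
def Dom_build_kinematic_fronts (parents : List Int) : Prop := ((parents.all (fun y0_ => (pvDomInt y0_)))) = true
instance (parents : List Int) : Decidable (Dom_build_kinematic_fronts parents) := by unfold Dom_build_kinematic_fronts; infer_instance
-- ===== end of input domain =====

-- B replaces A's per-level rescans of the whole joint range (with a linear 'in level' test inside)
-- by a children index built in one pass, expanding each front from its joints' children and sorting it.

-- ===== PORT A =====
-- 'for j in level: assigned[j] = True'
def pvAssignA (assigned : List Bool) (level : List Int) : List Bool :=
  level.foldl (fun a j => a.set j.toNat true) assigned

-- 'level = [i for i in range(n) if not assigned[i] and parents[i] in level]'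
def pvNextA (parents : List Int) (assigned : List Bool) (level : List Int) : List Int :=
  ((List.range parents.length).filter
    (fun i => !(assigned.getD i false) && decide (PySem.List.pyGetD parents (i : Int) 0 ∈ level))).map
    (fun i : Nat => (i : Int))

-- the while loop; fuel parents.length+1 makes it total and suffices: every executed body
-- assigns at least one previously unassigned joint, so at most parents.length bodies run
def pvLoopA (parents : List Int) :
    Nat → List Bool → List Int → List (List Int) → List (List Int) →
    List (List Int) × List (List Int)
  | 0, _, _, ind, pid => (ind, pid)
  | fuel+1, assigned, level, ind, pid =>
    if level = [] then (ind, pid)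
    else
      let assigned' := pvAssignA assigned level
      pvLoopA parents fuel assigned' (pvNextA parents assigned' level)
        (ind ++ [level]) (pid ++ [level.map (fun j => PySem.List.pyGetD parents j 0)])

def build_kinematic_fronts (parents : List Int) : List (List Int) × List (List Int) :=
  pvLoopA parents (parents.length + 1) (List.replicate parents.length false)
    (((List.range parents.length).filter
        (fun i : Nat => decide (PySem.List.pyGetD parents (i : Int) 0 < 0))).map (fun i : Nat => (i : Int)))
    [] []

-- ===== PORT B =====
-- one pass over enumerate(parents): roots (p < 0) and the children buckets (0 <= p < n)
def pvStepB (parents : List Int) (st : List (List Int) × List Int) (ip : Int × Int) :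
    List (List Int) × List Int :=
  if ip.2 < 0 then (st.1, st.2 ++ [ip.1])
  else if ip.2 < (parents.length : Int) then
    (st.1.set ip.2.toNat (st.1.getD ip.2.toNat [] ++ [ip.1]), st.2)
  else st

def pvIndexB (parents : List Int) : List (List Int) × List Int :=
  (PySem.List.enumerate parents).foldl (pvStepB parents) (List.replicate parents.length [], [])

-- 'while cur: ...; cur = sorted(i for j in cur for i in children[j])' (same fuel bound as A)
def pvLoopB (parents : List Int) (children : List (List Int)) :
    Nat → List Int → List (List Int) → List (List Int) →
    List (List Int) × List (List Int)
  | 0, _, ind, pid => (ind, pid)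
  | fuel+1, cur, ind, pid =>
    if cur = [] then (ind, pid)
    else
      pvLoopB parents children fuel
        (PySem.List.sorted (cur.flatMap (fun j => children.getD j.toNat [])) (fun x => x))
        (ind ++ [cur]) (pid ++ [cur.map (fun j => PySem.List.pyGetD parents j 0)])

def build_kinematic_fronts_alt (parents : List Int) : List (List Int) × List (List Int) :=
  pvLoopB parents (pvIndexB parents).1 (parents.length + 1) (pvIndexB parents).2 [] []

-- ===== PRECONDITION & SPEC =====
def Spec_build_kinematic_fronts (parents : List Int) (out : List (List Int) × List (List Int)) : Prop := out = build_kinematic_fronts_alt parents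
instance (parents : List Int) (out : List (List Int) × List (List Int)) : Decidable (Spec_build_kinematic_fronts parents out) := by unfold Spec_build_kinematic_fronts; infer_instance

-- ===== CLAIM (what is proved, stated in full; the proofs are below) =====
def Claim_equal_build_kinematic_fronts : Prop := ∀ (parents : List Int), Dom_build_kinematic_fronts parents → Spec_build_kinematic_fronts parents (build_kinematic_fronts parents)

-- ===== LEMMAS AND PROOFS =====

-- the loop invariant tying A's assigned array to the fronts: every joint of the current
-- front is unassigned and its parent is negative or already assigned, and every assigned
-- joint has a negative or assigned parent
def pvInv (parents : List Int) (assigned : List Bool) (level : List Int) : Prop :=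
  assigned.length = parents.length ∧
  List.Pairwise (· < ·) level ∧
  (∀ j ∈ level, ∃ i : Nat, i < parents.length ∧ j = (i : Int) ∧ assigned.getD i false = false ∧
     (PySem.List.pyGetD parents (i : Int) 0 < 0 ∨
      ∃ q : Nat, q < parents.length ∧ PySem.List.pyGetD parents (i : Int) 0 = (q : Int) ∧
        assigned.getD q false = true)) ∧
  (∀ i : Nat, i < parents.length → assigned.getD i false = true →
     (PySem.List.pyGetD parents (i : Int) 0 < 0 ∨
      ∃ q : Nat, q < parents.length ∧ PySem.List.pyGetD parents (i : Int) 0 = (q : Int) ∧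
        assigned.getD q false = true))

lemma pvGetD_set_self (l : List (List Int)) (t : Nat) (x : List Int) (h : t < l.length) :
    (l.set t x).getD t [] = x := by
  simp [List.getD_eq_getElem?_getD, List.getElem?_set_self h]

lemma pvGetD_set_ne (l : List (List Int)) (t p : Nat) (x : List Int) (h : t ≠ p) :
    (l.set t x).getD p [] = l.getD p [] := by
  simp [List.getD_eq_getElem?_getD, List.getElem?_set_ne h]

lemma pvPairwise_cast_filter_range (n : Nat) (p : Nat → Bool) :
    List.Pairwise (· < ·) (((List.range n).filter p).map (fun i : Nat => (i : Int))) :=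
 by
  refine List.pairwise_map.mpr (List.Pairwise.imp ?_ (List.pairwise_lt_range.filter p))
  exact fun {a b} h => Int.ofNat_lt.mpr h

lemma pvNodup_of_pairwise_lt {l : List Int} (h : List.Pairwise (· < ·) l) : l.Nodup :=
  h.imp (fun {a b} hb => ne_of_lt hb)

-- characterisation of the one-pass fold building (children, roots)
lemma pvIndexB_fold (parents : List Int) (L : List (Int × Int)) (C : List (List Int)) (R : List Int)
    (hC : C.length = parents.length) :
    (L.foldl (pvStepB parents) (C, R)).1.length = parents.length ∧
    (L.foldl (pvStepB parents) (C, R)).2 = R ++ (L.filter (fun ip => decide (ip.2 < 0))).map (·.1) ∧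
    ∀ p : Nat, (L.foldl (pvStepB parents) (C, R)).1.getD p [] =
      C.getD p [] ++ (L.filter (fun ip =>
        (!decide (ip.2 < 0)) && decide (ip.2 < (parents.length : Int)) && decide (ip.2.toNat = p))).map (·.1) := by
  induction L generalizing C R with
  | nil => simpa using hC
  | cons ip L ih =>
    by_cases h1 : ip.2 < 0
    · have h := ih C (R ++ [ip.1]) hC
      simp only [List.foldl_cons, pvStepB, if_pos h1]
      refine ⟨h.1, ?_, ?_⟩
      · rw [h.2.1]; simp [h1]
      · intro p
        rw [h.2.2 p]; simp [h1]
    · by_cases h2 : ip.2 < (parents.length : Int)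
      · have ht : ip.2.toNat < C.length := by rw [hC]; omega
        have hC' : (C.set ip.2.toNat (C.getD ip.2.toNat [] ++ [ip.1])).length = parents.length := by
          simpa using hC
        have h := ih (C.set ip.2.toNat (C.getD ip.2.toNat [] ++ [ip.1])) R hC'
        simp only [List.foldl_cons, pvStepB, if_neg h1, if_pos h2]
        refine ⟨h.1, ?_, ?_⟩
        · rw [h.2.1]; simp [h1]
        · intro p
          rw [h.2.2 p]
          by_cases hp : ip.2.toNat = p
          · subst hp
            rw [pvGetD_set_self _ _ _ ht]
            simp [h1, h2]
          · rw [pvGetD_set_ne _ _ _ _ hp]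
            simp [h1, h2, hp]
      · have h := ih C R hC
        simp only [List.foldl_cons, pvStepB, if_neg h1, if_neg h2]
        refine ⟨h.1, ?_, ?_⟩
        · rw [h.2.1]; simp [h1]
        · intro p
          rw [h.2.2 p]; simp [h1, h2]

lemma pvEnumerate_form (parents : List Int) :
    PySem.List.enumerate parents =
      (List.range parents.length).map (fun k : Nat => ((k : Int), PySem.List.pyGetD parents (k : Int) 0)) := by
  rw [PySem.List.enumerate_eq_map_pyRange parents 0]
  have hlen : PySem.List.len parents = (parents.length : Int) := by simp [pysem]
  rw [hlen, PySem.List.pyRange_zero_nat, List.map_map]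
  simp [Function.comp_def, List.getD_eq_getElem?_getD, pysem]

lemma pvGetD_replicate_false (n i : Nat) : (List.replicate n false).getD i false = false := by
  by_cases h : i < n
  · simp [List.getD_eq_getElem?_getD, h]
  · simp [List.getD_eq_getElem?_getD, h]

lemma pvGetD_replicate_nil (n i : Nat) : ((List.replicate n ([] : List Int)).getD i []) = [] := by
  by_cases h : i < n
  · simp [List.getD_eq_getElem?_getD, h]
  · simp [List.getD_eq_getElem?_getD, h]

-- roots = A's initial level
lemma pvRoots_eq (parents : List Int) :
    (pvIndexB parents).2 =
      ((List.range parents.length).filter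
        (fun i : Nat => decide (PySem.List.pyGetD parents (i : Int) 0 < 0))).map (fun i : Nat => (i : Int)) := by
  have h := (pvIndexB_fold parents (PySem.List.enumerate parents)
    (List.replicate parents.length []) [] (by simp)).2.1
  unfold pvIndexB
  rw [h, pvEnumerate_form, List.filter_map, List.map_map]
  simp [Function.comp_def]

-- the children bucket of q holds exactly the joints whose parent is q, in index order
lemma pvChildren_char (parents : List Int) (q : Nat) (hq : q < parents.length) :
    (pvIndexB parents).1.getD q [] =
      ((List.range parents.length).filter
        (fun i : Nat => decide (PySem.List.pyGetD parents (i : Int) 0 = (q : Int)))).map (fun i : Nat => (i : Int)) := by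
  have h := (pvIndexB_fold parents (PySem.List.enumerate parents)
    (List.replicate parents.length []) [] (by simp)).2.2 q
  unfold pvIndexB
  rw [h, pvGetD_replicate_nil, pvEnumerate_form, List.filter_map, List.map_map]
  simp only [List.nil_append, Function.comp_def]
  congr 1
  apply List.filter_congr
  intro i _
  refine Bool.eq_iff_iff.mpr ?_
  simp only [Bool.and_eq_true, Bool.not_eq_true', decide_eq_true_eq, decide_eq_false_iff_not]
  constructor
  · rintro ⟨⟨hn, hlt⟩, htn⟩; omega
  · intro hx; refine ⟨⟨by omega, by omega⟩, by omega⟩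

lemma pvAssignA_getD (assigned : List Bool) (level : List Int)
    (h : ∀ j ∈ level, ∃ i : Nat, i < assigned.length ∧ j = (i : Int)) :
    (pvAssignA assigned level).length = assigned.length ∧
    ∀ i : Nat, i < assigned.length →
      (pvAssignA assigned level).getD i false = (assigned.getD i false || decide ((i : Int) ∈ level)) := by
  induction level generalizing assigned with
  | nil => simp [pvAssignA]
  | cons j level ih =>
    obtain ⟨i0, hi0, rfl⟩ := h j (by simp)
    have hstep : pvAssignA assigned ((i0 : Int) :: level) = pvAssignA (assigned.set i0 true) level := by
      simp [pvAssignA]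
    have hlen : (assigned.set i0 true).length = assigned.length := by simp
    have h' : ∀ j ∈ level, ∃ i : Nat, i < (assigned.set i0 true).length ∧ j = (i : Int) := by
      intro j hj; rw [hlen]; exact h j (by simp [hj])
    have hih := ih (assigned.set i0 true) h'
    rw [hstep]
    refine ⟨by rw [hih.1, hlen], ?_⟩
    intro i hi
    rw [hih.2 i (by rw [hlen]; exact hi)]
    by_cases hii : i = i0
    · subst hii
      have hmem : ((i : Int) ∈ ((i : Int)) :: level) := by simp
      simp [List.getD_eq_getElem?_getD, List.getElem?_set_self hi, hmem]
    · have hset : (assigned.set i0 true).getD i false = assigned.getD i false := by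
        simp [List.getD_eq_getElem?_getD, List.getElem?_set_ne (by omega : i0 ≠ i)]
      rw [hset]
      have hmem : ((i : Int) ∈ ((i0 : Int)) :: level) ↔ ((i : Int) ∈ level) := by
        rw [List.mem_cons]
        constructor
        · rintro (h | h)
          · exact absurd (by exact_mod_cast h) hii
          · exact h
        · exact Or.inr
      rw [decide_eq_decide.mpr hmem]

-- a joint whose parent lies in the current front is still unassigned after the front is assigned
lemma pvNotAssigned (parents : List Int) (assigned : List Bool) (level : List Int)
    (h : pvInv parents assigned level) {i : Nat} (hi : i < parents.length)
    (hx : PySem.List.pyGetD parents (i : Int) 0 ∈ level) :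
    (pvAssignA assigned level).getD i false = false := by
  obtain ⟨hlen, hpw, hlev, hA2⟩ := h
  have hcast : ∀ j ∈ level, ∃ k : Nat, k < assigned.length ∧ j = (k : Int) := by
    intro j hj; obtain ⟨k, hk, rfl, -, -⟩ := hlev j hj; exact ⟨k, by omega, rfl⟩
  rw [(pvAssignA_getD assigned level hcast).2 i (by omega)]
  obtain ⟨q, hq, hqe, hqf, -⟩ := hlev _ hx
  have hai : assigned.getD i false = false := by
    by_contra hne
    have hA := hA2 i hi (by revert hne; cases assigned.getD i false <;> simp)
    rcases hA with hneg | ⟨q', hq', he', ht'⟩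
    · omega
    · have hqq : q' = q := by omega
      rw [hqq, hqf] at ht'; cases ht'
  have hni : ((i : Int) ∉ level) := by
    intro hmem
    obtain ⟨i2, hi2, he2, hf2, hp2⟩ := hlev _ hmem
    have : i2 = i := by exact_mod_cast he2.symm
    subst this
    rcases hp2 with hneg | ⟨q2, hq2, he2', ht2⟩
    · omega
    · have hqq : q2 = q := by omega
      rw [hqq, hqf] at ht2; cases ht2
  have hd : decide ((i : Int) ∈ level) = false := by simp [hni]
  rw [hd, Bool.or_false]
  exact hai

-- A's next front, with the redundant 'not assigned[i]' dropped
lemma pvNextA_eq (parents : List Int) (assigned : List Bool) (level : List Int)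
    (h : pvInv parents assigned level) :
    pvNextA parents (pvAssignA assigned level) level =
      ((List.range parents.length).filter
        (fun i : Nat => decide (PySem.List.pyGetD parents (i : Int) 0 ∈ level))).map (fun i : Nat => (i : Int)) := by
  unfold pvNextA
  congr 1
  apply List.filter_congr
  intro i hi
  simp only [List.mem_range] at hi
  by_cases hx : PySem.List.pyGetD parents (i : Int) 0 ∈ level
  · rw [pvNotAssigned parents assigned level h hi hx]
    simp
  · rw [decide_eq_false hx]
    simp

lemma pvInv_step (parents : List Int) (assigned : List Bool) (level : List Int)
    (h : pvInv parents assigned level) :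
    pvInv parents (pvAssignA assigned level)
      (((List.range parents.length).filter
        (fun i : Nat => decide (PySem.List.pyGetD parents (i : Int) 0 ∈ level))).map (fun i : Nat => (i : Int))) := by
  obtain ⟨hlen, hpw, hlev, hA2⟩ := h
  have hcast : ∀ j ∈ level, ∃ k : Nat, k < assigned.length ∧ j = (k : Int) := by
    intro j hj; obtain ⟨k, hk, rfl, -, -⟩ := hlev j hj; exact ⟨k, by omega, rfl⟩
  have hAG := pvAssignA_getD assigned level hcast
  refine ⟨by rw [hAG.1, hlen], pvPairwise_cast_filter_range _ _, ?_, ?_⟩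
  · intro j hj
    simp only [List.mem_map, List.mem_filter, List.mem_range, decide_eq_true_eq] at hj
    obtain ⟨i, ⟨hi, hxi⟩, rfl⟩ := hj
    refine ⟨i, hi, rfl, pvNotAssigned parents assigned level ⟨hlen, hpw, hlev, hA2⟩ hi hxi, ?_⟩
    obtain ⟨q, hq, hqe, -, -⟩ := hlev _ hxi
    refine Or.inr ⟨q, hq, hqe, ?_⟩
    rw [hAG.2 q (by omega)]
    have : ((q : Int) ∈ level) := hqe ▸ hxi
    simp [this]
  · intro i hi hti
    rw [hAG.2 i (by omega)] at hti
    simp only [Bool.or_eq_true, decide_eq_true_eq] at hti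
    rcases hti with hA | hL
    · rcases hA2 i hi hA with hneg | ⟨q, hq, he, ht⟩
      · exact Or.inl hneg
      · exact Or.inr ⟨q, hq, he, by rw [hAG.2 q (by omega), ht, Bool.true_or]⟩
    · obtain ⟨i2, hi2, he2, hf2, hp2⟩ := hlev _ hL
      have : i2 = i := by exact_mod_cast he2.symm
      subst this
      rcases hp2 with hneg | ⟨q, hq, he, ht⟩
      · exact Or.inl hneg
      · exact Or.inr ⟨q, hq, he, by rw [hAG.2 q (by omega), ht, Bool.true_or]⟩

-- B's next front (children of the current front, sorted) is A's next front
lemma pvNextB_eq (parents : List Int) (assigned : List Bool) (level : List Int)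
    (h : pvInv parents assigned level) :
    PySem.List.sorted (level.flatMap (fun j => (pvIndexB parents).1.getD j.toNat [])) (fun x => x) =
      ((List.range parents.length).filter
        (fun i : Nat => decide (PySem.List.pyGetD parents (i : Int) 0 ∈ level))).map (fun i : Nat => (i : Int)) := by
  obtain ⟨hlen, hpw, hlev, hA2⟩ := h
  have hTpw : List.Pairwise (· < ·)
      (((List.range parents.length).filter
        (fun i : Nat => decide (PySem.List.pyGetD parents (i : Int) 0 ∈ level))).map (fun i : Nat => (i : Int))) :=
    pvPairwise_cast_filter_range _ _
  have hbkt : ∀ j ∈ level, ∀ x : Int,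
      (x ∈ (pvIndexB parents).1.getD j.toNat [] ↔
        ∃ i : Nat, i < parents.length ∧ PySem.List.pyGetD parents (i : Int) 0 = j ∧ x = (i : Int)) := by
    intro j hj x
    obtain ⟨q, hq, rfl, -, -⟩ := hlev j hj
    rw [Int.toNat_natCast, pvChildren_char parents q hq]
    simp only [List.mem_map, List.mem_filter, List.mem_range, decide_eq_true_eq]
    constructor
    · rintro ⟨i, ⟨hi, he⟩, rfl⟩; exact ⟨i, hi, he, rfl⟩
    · rintro ⟨i, hi, he, rfl⟩; exact ⟨i, ⟨hi, he⟩, rfl⟩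
  apply PySem.List.sorted_eq_of_perm_of_pairwise_lt _ _ _ _ hTpw
  refine (List.perm_ext_iff_of_nodup (pvNodup_of_pairwise_lt hTpw) ?_).mpr ?_
  · refine List.nodup_flatMap.mpr ⟨?_, ?_⟩
    · intro j hj
      obtain ⟨k, hk, rfl, -, -⟩ := hlev j hj
      show ((pvIndexB parents).1.getD ((k : Int)).toNat []).Nodup
      rw [Int.toNat_natCast, pvChildren_char parents k hk]
      exact pvNodup_of_pairwise_lt (pvPairwise_cast_filter_range _ _)
    · refine hpw.imp_of_mem ?_
      intro a b ha hb hab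
      intro x hxa hxb
      obtain ⟨i1, hi1, he1, rfl⟩ := (hbkt a ha x).mp hxa
      obtain ⟨i2, hi2, he2, he⟩ := (hbkt b hb _).mp hxb
      have : i2 = i1 := by exact_mod_cast he.symm
      subst this
      omega
  · intro x
    simp only [List.mem_map, List.mem_filter, List.mem_range, decide_eq_true_eq, List.mem_flatMap]
    constructor
    · rintro ⟨i, ⟨hi, hxi⟩, rfl⟩
      exact ⟨PySem.List.pyGetD parents (i : Int) 0, hxi,
        (hbkt _ hxi _).mpr ⟨i, hi, rfl, rfl⟩⟩
    · rintro ⟨j, hj, hxj⟩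
      obtain ⟨i, hi, he, rfl⟩ := (hbkt j hj x).mp hxj
      exact ⟨i, ⟨hi, he ▸ hj⟩, rfl⟩

lemma pvInv_init (parents : List Int) :
    pvInv parents (List.replicate parents.length false)
      (((List.range parents.length).filter
        (fun i : Nat => decide (PySem.List.pyGetD parents (i : Int) 0 < 0))).map (fun i : Nat => (i : Int))) := by
  refine ⟨by simp, pvPairwise_cast_filter_range _ _, ?_, ?_⟩
  · intro j hj
    simp only [List.mem_map, List.mem_filter, List.mem_range, decide_eq_true_eq] at hj
    obtain ⟨i, ⟨hi, hneg⟩, rfl⟩ := hj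
    exact ⟨i, hi, rfl, pvGetD_replicate_false _ _, Or.inl hneg⟩
  · intro i hi hti
    rw [pvGetD_replicate_false] at hti; cases hti

lemma pvLoop_eq (parents : List Int) :
    ∀ (f : Nat) (assigned : List Bool) (level : List Int) (ind pid : List (List Int)),
      pvInv parents assigned level →
      pvLoopA parents f assigned level ind pid = pvLoopB parents (pvIndexB parents).1 f level ind pid := by
  intro f
  induction f with
  | zero => intro _ _ _ _ _; rfl
  | succ f ih =>
    intro assigned level ind pid h
    by_cases hl : level = []
    · simp [pvLoopA, pvLoopB, hl]
    · simp only [pvLoopA, pvLoopB, if_neg hl]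
      rw [pvNextA_eq parents assigned level h, pvNextB_eq parents assigned level h]
      exact ih _ _ _ _ (pvInv_step parents assigned level h)

-- ===== VERDICT (by name: the statement is the Claim_ definition above) =====
theorem build_kinematic_fronts_spec : Claim_equal_build_kinematic_fronts := by
  intro parents _
  show build_kinematic_fronts parents = build_kinematic_fronts_alt parents
  unfold build_kinematic_fronts build_kinematic_fronts_alt
  rw [pvRoots_eq]
  exact pvLoop_eq parents (parents.length + 1) _ _ [] [] (pvInv_init parents)
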